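-- pv_equiv track=rewrite | github.com/RenamedUse/AlphaHack_28.11.25 | app/seed_data.py | _detect_feature_columns
-- ===== SOURCE A (Python) =====
-- from typing import Optional, Dict, Any, List
--
-- def _detect_feature_columns(fieldnames: List[str]) -> Dict[str, Optional[str]]:
--     """Определить, какие столбцы в CSV соответствуют имени/описанию/типу."""
--     lower = [f.lower() for f in fieldnames]
--
--     def find(*candidates: str) -> Optional[str]:
--         for cand in candidates:
--             for orig, low in zip(fieldnames, lower):
--                 if cand in low:
--                     return orig
--         return None
--
--     return {
--         "name": find("feature", "name", "признак", "feature_name"),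
--         "title": find("title", "display", "rus", "описание"),
--         "description": find("description", "описание", "comment"),
--         "dtype": find("type", "dtype", "format"),
--     }
-- ===== SOURCE B (Python) =====
-- from typing import Optional, Dict, List
--
-- _CATEGORIES = [
--     ("name", ["feature", "name", "признак", "feature_name"]),
--     ("title", ["title", "display", "rus", "описание"]),
--     ("description", ["description", "описание", "comment"]),
--     ("dtype", ["type", "dtype", "format"]),
-- ]
-- _ALL_CANDIDATES = [c for _, cands in _CATEGORIES for c in cands]
--
-- def _detect_feature_columns(fieldnames: List[str]) -> Dict[str, Optional[str]]:
--     # One pass: map each candidate to the FIRST fieldname whose lowercase contains it.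
--     index = {}
--     for orig in fieldnames:
--         low = orig.lower()
--         for cand in _ALL_CANDIDATES:
--             if cand in low and cand not in index:
--                 index[cand] = orig
--     return {key: next((index[c] for c in cands if c in index), None)
--             for key, cands in _CATEGORIES}
-- ===== Notes on version B (the rewrite author's own statement) =====
-- stated objective: alternative
-- what changed: B replaces A's per-category, per-candidate rescans of fieldnames with a single pass that builds an index dict mapping each candidate to the first matching fieldname, then answers each category by ordered lookups in that index.
import Mathlib
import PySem

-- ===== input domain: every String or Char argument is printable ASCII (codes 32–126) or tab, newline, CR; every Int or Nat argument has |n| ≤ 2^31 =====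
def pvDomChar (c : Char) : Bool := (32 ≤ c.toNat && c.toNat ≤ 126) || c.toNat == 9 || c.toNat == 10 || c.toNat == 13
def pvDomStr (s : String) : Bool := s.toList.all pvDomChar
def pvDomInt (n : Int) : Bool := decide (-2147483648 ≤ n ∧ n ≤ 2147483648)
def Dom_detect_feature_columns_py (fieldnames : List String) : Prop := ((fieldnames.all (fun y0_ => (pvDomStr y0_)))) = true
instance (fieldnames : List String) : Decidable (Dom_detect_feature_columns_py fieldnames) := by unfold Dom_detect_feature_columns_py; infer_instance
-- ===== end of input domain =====

-- ===== PORT A =====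
-- A: for each category, scan candidates in order, and for each candidate scan
-- the (fieldname, lowered) pairs, returning the first fieldname whose lowered
-- form contains the candidate ('cand in low' = PySem.Str.isIn, exact).
def pvFindInner (cand : String) : List (String × String) → Option String
  | [] => none
  | (orig, low) :: rest =>
      if PySem.Str.isIn cand low then some orig else pvFindInner cand rest

def pvFindA (pairs : List (String × String)) : List String → Option String
  | [] => none
  | c :: cs =>
      match pvFindInner c pairs with
      | some o => some o
      | none => pvFindA pairs cs

def detect_feature_columns_py (fieldnames : List String) : List (String × Option String) :=
  let lower := fieldnames.map PySem.Str.lower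
  let pairs := fieldnames.zip lower
  [("name", pvFindA pairs ["feature", "name", "признак", "feature_name"]),
   ("title", pvFindA pairs ["title", "display", "rus", "описание"]),
   ("description", pvFindA pairs ["description", "описание", "comment"]),
   ("dtype", pvFindA pairs ["type", "dtype", "format"])]

-- ===== PORT B =====
-- B: one pass over fieldnames building an index dict candidate ↦ first matching
-- fieldname; then each category is answered by ordered lookups in the index.
def pvAllCands : List String :=
  ["feature", "name", "признак", "feature_name",
   "title", "display", "rus", "описание",
   "description", "описание", "comment",
   "type", "dtype", "format"]

-- body of Source B's inner loop: record orig for cand only if cand matches and is absent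
def pvStep (low orig : String) (d : PySem.Dict String String) (cand : String) :
    PySem.Dict String String :=
  if PySem.Str.isIn cand low && !(d.contains cand) then d.insert cand orig else d

def pvIndexStep (idx : PySem.Dict String String) (orig : String) : PySem.Dict String String :=
  pvAllCands.foldl (pvStep (PySem.Str.lower orig) orig) idx

def pvLookup (idx : PySem.Dict String String) : List String → Option String
  | [] => none
  | c :: cs =>
      match idx.get? c with
      | some o => some o
      | none => pvLookup idx cs

def detect_feature_columns_py_alt (fieldnames : List String) : List (String × Option String) :=
  let idx := fieldnames.foldl pvIndexStep PySem.Dict.empty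
  [("name", pvLookup idx ["feature", "name", "признак", "feature_name"]),
   ("title", pvLookup idx ["title", "display", "rus", "описание"]),
   ("description", pvLookup idx ["description", "описание", "comment"]),
   ("dtype", pvLookup idx ["type", "dtype", "format"])]

-- ===== PRECONDITION & SPEC =====
def Spec_detect_feature_columns_py (fieldnames : List String) (out : List (String × Option String)) : Prop := out = detect_feature_columns_py_alt fieldnames
instance (fieldnames : List String) (out : List (String × Option String)) : Decidable (Spec_detect_feature_columns_py fieldnames out) := by unfold Spec_detect_feature_columns_py; infer_instance

-- ===== CLAIM (what is proved, stated in full; the proofs are below) =====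
def Claim_equal_detect_feature_columns_py : Prop := ∀ (fieldnames : List String), Dom_detect_feature_columns_py fieldnames → Spec_detect_feature_columns_py fieldnames (detect_feature_columns_py fieldnames)

-- ===== LEMMAS AND PROOFS =====

lemma pvStep_get?_ne (low orig : String) (d : PySem.Dict String String) (c x : String)
    (h : x ≠ c) : (pvStep low orig d c).get? x = d.get? x := by
  unfold pvStep
  split_ifs with _
  · exact PySem.Dict.get?_insert_of_ne d orig h
  · rfl

lemma pvStep_contains_ne (low orig : String) (d : PySem.Dict String String) (c x : String)
    (h : x ≠ c) : (pvStep low orig d c).contains x = d.contains x := by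
  rw [PySem.Dict.contains_eq_isSome_get?, pvStep_get?_ne low orig d c x h,
      ← PySem.Dict.contains_eq_isSome_get?]

lemma pvStep_of_contains (low orig : String) (d : PySem.Dict String String) (c : String)
    (hd : d.contains c = true) : pvStep low orig d c = d := by
  unfold pvStep; simp [hd]

lemma pvStep_get?_self (low orig : String) (d : PySem.Dict String String) (c : String)
    (hd : d.contains c = false) :
    (pvStep low orig d c).get? c =
      if PySem.Str.isIn c low = true then some orig else d.get? c := by
  unfold pvStep
  cases h : PySem.Chars.isIn c.toList low.toList with
  | true => simp [h, hd, PySem.Dict.get?_insert_self]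
  | false => simp [h]

-- the inner fold never changes an existing binding
lemma pvFold_get_of_contains (low orig : String) (cands : List String) :
    ∀ (d : PySem.Dict String String) (x : String), d.contains x = true →
      (cands.foldl (pvStep low orig) d).get? x = d.get? x := by
  induction cands with
  | nil => intro d x _; rfl
  | cons c cs ih =>
    intro d x hd
    simp only [List.foldl_cons]
    by_cases hc : x = c
    · subst hc
      rw [pvStep_of_contains low orig d x hd]
      exact ih d x hd
    · have h2 : (pvStep low orig d c).contains x = true := by
        rw [pvStep_contains_ne low orig d c x hc]; exact hd
      rw [ih _ x h2, pvStep_get?_ne low orig d c x hc]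

-- the inner fold binds an absent key x to orig iff x ∈ cands and x occurs in low
lemma pvFold_get_of_not_contains (low orig : String) (cands : List String) :
    ∀ (d : PySem.Dict String String) (x : String), d.contains x = false →
      (cands.foldl (pvStep low orig) d).get? x =
        if x ∈ cands ∧ PySem.Str.isIn x low = true then some orig else none := by
  induction cands with
  | nil =>
    intro d x hd
    simpa using (PySem.Dict.get?_eq_none_iff_contains d x).2 hd
  | cons c cs ih =>
    intro d x hd
    simp only [List.foldl_cons]
    by_cases hc : x = c
    · subst hc
      cases h : PySem.Chars.isIn x.toList low.toList with
      | true =>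
        have hg : (pvStep low orig d x).get? x = some orig := by
          rw [pvStep_get?_self low orig d x hd]; simp [h]
        have hcont : (pvStep low orig d x).contains x = true := by
          rw [PySem.Dict.contains_eq_isSome_get?, hg]; rfl
        rw [pvFold_get_of_contains low orig cs _ x hcont, hg]
        simp [h]
      | false =>
        have hg : pvStep low orig d x = d := by unfold pvStep; simp [h]
        rw [hg, ih d x hd]
        simp [h]
    · have h2 : (pvStep low orig d c).contains x = false := by
        rw [pvStep_contains_ne low orig d c x hc]; exact hd
      rw [ih _ x h2]
      simp [List.mem_cons, hc]

-- the outer fold never changes an existing binding either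
lemma pvIndexFold_get_of_contains (fs : List String) :
    ∀ (d : PySem.Dict String String) (x : String), d.contains x = true →
      (fs.foldl pvIndexStep d).get? x = d.get? x := by
  induction fs with
  | nil => intro d x _; rfl
  | cons f fs ih =>
    intro d x hd
    simp only [List.foldl_cons]
    have h1 : (pvIndexStep d f).get? x = d.get? x := by
      unfold pvIndexStep
      exact pvFold_get_of_contains (PySem.Str.lower f) f pvAllCands d x hd
    have h2 : (pvIndexStep d f).contains x = true := by
      rw [PySem.Dict.contains_eq_isSome_get?, h1, ← PySem.Dict.contains_eq_isSome_get?]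
      exact hd
    rw [ih _ x h2, h1]

-- the index's binding for a candidate is the first fieldname containing it
lemma pvIndex_get (x : String) (hx : x ∈ pvAllCands) (fieldnames : List String) :
    ∀ d : PySem.Dict String String, d.contains x = false →
      (fieldnames.foldl pvIndexStep d).get? x
        = pvFindInner x (fieldnames.zip (fieldnames.map PySem.Str.lower)) := by
  induction fieldnames with
  | nil =>
    intro d hd
    simpa [pvFindInner] using (PySem.Dict.get?_eq_none_iff_contains d x).2 hd
  | cons f fs ih =>
    intro d hd
    simp only [List.foldl_cons, List.map_cons, List.zip_cons_cons, pvFindInner]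
    have hstep : (pvIndexStep d f).get? x =
        if x ∈ pvAllCands ∧ PySem.Str.isIn x (PySem.Str.lower f) = true then some f
        else none := by
      unfold pvIndexStep
      exact pvFold_get_of_not_contains (PySem.Str.lower f) f pvAllCands d x hd
    cases h : PySem.Chars.isIn x.toList (PySem.Chars.lower f.toList) with
    | true =>
      have hg : (pvIndexStep d f).get? x = some f := by rw [hstep]; simp [hx, h]
      have hc : (pvIndexStep d f).contains x = true := by
        rw [PySem.Dict.contains_eq_isSome_get?, hg]; rfl
      rw [pvIndexFold_get_of_contains fs _ x hc, hg]
      simp [h]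
    | false =>
      have hg : (pvIndexStep d f).get? x = none := by rw [hstep]; simp [h]
      have hc : (pvIndexStep d f).contains x = false := by
        rw [PySem.Dict.contains_eq_isSome_get?, hg]; rfl
      rw [ih _ hc]
      simp [h]

-- ordered lookups in the index = A's candidate-by-candidate search
lemma pvLookup_eq_findA (fieldnames : List String) (cands : List String)
    (h : ∀ c ∈ cands, c ∈ pvAllCands) :
    pvLookup (fieldnames.foldl pvIndexStep PySem.Dict.empty) cands
      = pvFindA (fieldnames.zip (fieldnames.map PySem.Str.lower)) cands := by
  induction cands with
  | nil => rfl
  | cons c cs ih =>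
    simp only [pvLookup, pvFindA]
    rw [pvIndex_get c (h c (by simp)) fieldnames PySem.Dict.empty
          (PySem.Dict.contains_empty c)]
    cases pvFindInner c (fieldnames.zip (fieldnames.map PySem.Str.lower)) with
    | some o => rfl
    | none => exact ih (fun c hc => h c (by simp [hc]))

-- ===== VERDICT (by name: the statement is the Claim_ definition above) =====
theorem detect_feature_columns_py_spec : Claim_equal_detect_feature_columns_py := by
  intro fieldnames _
  unfold Spec_detect_feature_columns_py detect_feature_columns_py detect_feature_columns_py_alt
  dsimp only
  rw [pvLookup_eq_findA _ _ (by decide), pvLookup_eq_findA _ _ (by decide),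
      pvLookup_eq_findA _ _ (by decide), pvLookup_eq_findA _ _ (by decide)]
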